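-- pv_equiv track=rewrite | github.com/ck1894/eng-ai-agents | assignments/assignment-2/scripts/retrieve_segments.py | segment_labels_and_support
-- ===== SOURCE A (Python) =====
-- def segment_labels_and_support(
--     segment_frame_rows: list[int],
--     query_set: set[str],
--     frame_label_sets: list[set[str]],
-- ) -> tuple[str, int]:
--     """
--     Return:
--       - class_label: ALL labels used for matching within this segment (pipe-separated)
--       - support: total number of matched labels across all frames (sum of overlap sizes)
--
--     labels_used = union over frames of (query_set ∩ frame_labels)
--     support = Σ over frames |query_set ∩ frame_labels|
--     """
--     labels_used: set[str] = set()
--     support = 0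
--
--     for r in segment_frame_rows:
--         ov = query_set & frame_label_sets[r]
--         if ov:
--             labels_used |= ov
--             support += len(ov)
--
--     if not labels_used:
--         fallback = sorted(list(query_set))[0] if query_set else "unknown"
--         return fallback, 0
--
--     label_str = "|".join(sorted(labels_used))
--     return label_str, int(support)
-- ===== SOURCE B (Python) =====
-- def segment_labels_and_support(
--     segment_frame_rows: list[int],
--     query_set: set[str],
--     frame_label_sets: list[set[str]],
-- ) -> tuple[str, int]:
--     # Label-major counting: for each query label (in sorted order), count how many
--     # referenced frames contain it; no set unions/intersections are formed at all.
--     qs = sorted(query_set)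
--     used = []
--     support = 0
--     for label in qs:
--         hits = 0
--         for r in segment_frame_rows:
--             if label in frame_label_sets[r]:
--                 hits += 1
--         if hits:
--             used.append(label)
--             support += hits
--     if not used:
--         return (qs[0] if qs else "unknown"), 0
--     return "|".join(used), support
-- ===== Notes on version B (the rewrite author's own statement) =====
-- stated objective: alternative
-- what changed: B swaps the loop nesting: instead of A's frame-major pass building a union of per-frame set intersections and sorting it at the end, B iterates label-major over the sorted query labels, counts for each label how many referenced frames contain it, and emits the used labels already in sorted order with no set operations at all; correctness rests on exchanging the double sum and on union-of-intersections = labels with a positive hit count.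
import Mathlib
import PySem

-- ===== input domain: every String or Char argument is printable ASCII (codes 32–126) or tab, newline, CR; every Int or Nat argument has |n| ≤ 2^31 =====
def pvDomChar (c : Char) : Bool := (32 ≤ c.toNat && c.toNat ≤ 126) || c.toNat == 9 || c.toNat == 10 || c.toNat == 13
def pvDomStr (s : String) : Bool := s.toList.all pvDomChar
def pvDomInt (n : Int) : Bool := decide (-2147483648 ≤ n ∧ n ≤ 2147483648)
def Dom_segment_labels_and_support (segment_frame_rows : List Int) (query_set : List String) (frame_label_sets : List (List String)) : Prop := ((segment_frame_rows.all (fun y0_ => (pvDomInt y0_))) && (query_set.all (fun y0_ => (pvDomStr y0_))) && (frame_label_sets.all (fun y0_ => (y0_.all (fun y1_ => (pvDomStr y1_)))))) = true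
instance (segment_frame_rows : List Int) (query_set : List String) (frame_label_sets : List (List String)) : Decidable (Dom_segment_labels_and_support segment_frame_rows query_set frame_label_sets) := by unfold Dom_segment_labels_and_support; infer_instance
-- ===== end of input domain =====

-- B swaps the loop nesting: label-major counting over the sorted query labels instead of
-- A's frame-major union of per-frame intersections (alternative decomposition, same cost).

-- ===== PORT A =====
def segment_labels_and_support (segment_frame_rows : List Int) (query_set : List String) (frame_label_sets : List (List String)) : String × Int :=
  -- labels_used = set(); support = 0; for r in rows: ov = query & frames[r]; if ov: labels_used |= ov; support += len(ov)
  let st := segment_frame_rows.foldl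
    (fun (st : PySem.Set String × Int) r =>
      let ov := PySem.Set.inter query_set (PySem.List.pyGetD frame_label_sets r [])
      if ov ≠ [] then (PySem.Set.union st.1 ov, st.2 + PySem.Set.len ov) else st)
    (PySem.Set.empty, 0)
  if st.1 = [] then
    ((if query_set ≠ [] then PySem.List.pyGetD (PySem.List.sorted query_set (fun x => x)) 0 "unknown" else "unknown"), 0)
  else
    (PySem.Str.join "|" (PySem.List.sorted st.1 (fun x => x)), st.2)

-- ===== PORT B =====
def segment_labels_and_support_alt (segment_frame_rows : List Int) (query_set : List String) (frame_label_sets : List (List String)) : String × Int :=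
  -- qs = sorted(query_set); used = []; support = 0
  -- for label in qs: hits = 0; for r in rows: if label in frames[r]: hits += 1
  --                  if hits: used.append(label); support += hits
  let qs := PySem.List.sorted query_set (fun x => x)
  let st := qs.foldl
    (fun (st : List String × Int) label =>
      let hits : Int := segment_frame_rows.foldl
        (fun h r => if label ∈ PySem.List.pyGetD frame_label_sets r [] then h + 1 else h) 0
      if hits ≠ 0 then (st.1 ++ [label], st.2 + hits) else st)
    ([], 0)
  if st.1 = [] then
    ((match qs with | [] => "unknown" | h :: _ => h), 0)
  else
    (PySem.Str.join "|" st.1, st.2)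

-- ===== PRECONDITION & SPEC =====
-- Pre_ excludes row indices out of range (Python IndexError in both A and B) and enforces the
-- set-representation invariant of the type convention: query_set and each frame label set hold distinct elements.
def Pre_segment_labels_and_support (segment_frame_rows : List Int) (query_set : List String) (frame_label_sets : List (List String)) : Prop :=
  (∀ r ∈ segment_frame_rows, PySem.Raise.InRange frame_label_sets.length r) ∧
  query_set.Nodup ∧ ∀ fs ∈ frame_label_sets, fs.Nodup
instance (segment_frame_rows : List Int) (query_set : List String) (frame_label_sets : List (List String)) : Decidable (Pre_segment_labels_and_support segment_frame_rows query_set frame_label_sets) := by unfold Pre_segment_labels_and_support; infer_instance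
def pvWitness_segment_labels_and_support : List Int × List String × List (List String) := ([0, -1], ["a", "b"], [["b", "x"]])
def Spec_segment_labels_and_support (segment_frame_rows : List Int) (query_set : List String) (frame_label_sets : List (List String)) (out : String × Int) : Prop := out = segment_labels_and_support_alt segment_frame_rows query_set frame_label_sets
instance (segment_frame_rows : List Int) (query_set : List String) (frame_label_sets : List (List String)) (out : String × Int) : Decidable (Spec_segment_labels_and_support segment_frame_rows query_set frame_label_sets out) := by unfold Spec_segment_labels_and_support; infer_instance

-- ===== CLAIM =====
def Claim_equal_segment_labels_and_support : Prop := ∀ (segment_frame_rows : List Int) (query_set : List String) (frame_label_sets : List (List String)), Dom_segment_labels_and_support segment_frame_rows query_set frame_label_sets → Pre_segment_labels_and_support segment_frame_rows query_set frame_label_sets → Spec_segment_labels_and_support segment_frame_rows query_set frame_label_sets (segment_labels_and_support segment_frame_rows query_set frame_label_sets)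

-- ===== LEMMAS AND PROOFS =====

-- A's loop: second component accumulates the sum of overlap sizes (the 'if ov' guard is inert).
theorem pvA_snd (query_set : List String) (frame_label_sets : List (List String))
    (rows : List Int) (st : PySem.Set String × Int) :
    (rows.foldl
      (fun (st : PySem.Set String × Int) r =>
        let ov := PySem.Set.inter query_set (PySem.List.pyGetD frame_label_sets r [])
        if ov ≠ [] then (PySem.Set.union st.1 ov, st.2 + PySem.Set.len ov) else st)
      st).2
    = st.2 + (rows.map (fun r => PySem.Set.len (PySem.Set.inter query_set (PySem.List.pyGetD frame_label_sets r [])))).sum := by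
  induction rows generalizing st with
  | nil => simp
  | cons r rows ih =>
    simp only [List.foldl_cons, List.map_cons, List.sum_cons, ih]
    split_ifs with h
    · ring
    · simp only [ne_eq, not_not] at h
      simp [h, PySem.Set.len]

-- A's loop: membership in the accumulated label set.
theorem pvA_fst_mem (query_set : List String) (frame_label_sets : List (List String))
    (rows : List Int) (st : PySem.Set String × Int) (x : String) :
    x ∈ (rows.foldl
      (fun (st : PySem.Set String × Int) r =>
        let ov := PySem.Set.inter query_set (PySem.List.pyGetD frame_label_sets r [])
        if ov ≠ [] then (PySem.Set.union st.1 ov, st.2 + PySem.Set.len ov) else st)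
      st).1
    ↔ x ∈ st.1 ∨ ∃ r ∈ rows, x ∈ query_set ∧ x ∈ PySem.List.pyGetD frame_label_sets r [] := by
  induction rows generalizing st with
  | nil => simp
  | cons r rows ih =>
    simp only [List.foldl_cons, ih]
    split_ifs with h
    · simp only [PySem.Set.mem_union, PySem.Set.mem_inter, List.mem_cons]
      aesop
    · simp only [ne_eq, not_not] at h
      have hnot : ¬ (x ∈ query_set ∧ x ∈ PySem.List.pyGetD frame_label_sets r []) := by
        intro hc
        have : x ∈ PySem.Set.inter query_set (PySem.List.pyGetD frame_label_sets r []) :=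
          (PySem.Set.mem_inter _ _ _).mpr hc
        rw [h] at this
        exact absurd this (List.not_mem_nil)
      simp only [List.mem_cons]
      aesop

-- A's loop: the accumulated label set stays duplicate-free.
theorem pvA_fst_nodup (query_set : List String) (frame_label_sets : List (List String))
    (rows : List Int) (st : PySem.Set String × Int) (h : st.1.Nodup) :
    (rows.foldl
      (fun (st : PySem.Set String × Int) r =>
        let ov := PySem.Set.inter query_set (PySem.List.pyGetD frame_label_sets r [])
        if ov ≠ [] then (PySem.Set.union st.1 ov, st.2 + PySem.Set.len ov) else st)
      st).1.Nodup := by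
  induction rows generalizing st with
  | nil => exact h
  | cons r rows ih =>
    simp only [List.foldl_cons]
    split_ifs with hne
    · exact ih _ (PySem.Set.nodup_union _ _ h)
    · exact ih _ h

-- Pointwise addition distributes over a mapped sum.
theorem pv_sum_map_add {α : Type} (l : List α) (f g : α → Int) :
    (l.map (fun x => f x + g x)).sum = (l.map f).sum + (l.map g).sum := by
  induction l with
  | nil => simp
  | cons x l ih => simp only [List.map_cons, List.sum_cons, ih]; ring

-- Filter length as a mapped indicator sum.
theorem pv_filter_len_eq_sum {α : Type} (l : List α) (p : α → Bool) :
    ((l.filter p).length : Int) = (l.map (fun x => if p x then (1 : Int) else 0)).sum := by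
  induction l with
  | nil => simp
  | cons x l ih =>
    by_cases h : p x <;> simp [h, ← ih] <;> try ring

-- Exchange of the double count: row-major overlap sizes = label-major hit counts.
theorem pv_sum_swap (R : List Int) (q : List String) (P : Int → String → Bool) :
    (R.map (fun r => ((q.filter (P r)).length : Int))).sum
      = (q.map (fun l => ((R.filter (fun r => P r l)).length : Int))).sum := by
  induction R with
  | nil =>
    induction q with
    | nil => simp
    | cons x q ihq => simpa using ihq

  | cons r R ih =>
    simp only [List.map_cons, List.sum_cons, ih]
    have hstep : (q.map (fun l => (((r :: R).filter (fun r' => P r' l)).length : Int)))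
        = q.map (fun l => (if P r l then (1 : Int) else 0)
            + ((R.filter (fun r' => P r' l)).length : Int)) := by
      apply List.map_congr_left
      intro l _
      by_cases h : P r l <;> simp [h] <;> try ring
    rw [hstep, pv_sum_map_add, ← pv_filter_len_eq_sum]

-- B's inner loop is the hit count of one label.
theorem pv_cnt_eq (frame_label_sets : List (List String)) (R : List Int) (l : String) (c : Int) :
    R.foldl (fun h r => if l ∈ PySem.List.pyGetD frame_label_sets r [] then h + 1 else h) c
      = c + ((R.filter (fun r => decide (l ∈ PySem.List.pyGetD frame_label_sets r []))).length : Int) := by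
  induction R generalizing c with
  | nil => simp
  | cons r R ih =>
    by_cases h : l ∈ PySem.List.pyGetD frame_label_sets r [] <;> simp [h, ih] <;> try ring

-- B's outer loop: used labels are the filtered label list, support the summed hit counts.
theorem pvB_loop (frame_label_sets : List (List String)) (R : List Int)
    (L : List String) (u : List String) (s : Int) :
    L.foldl
      (fun (st : List String × Int) label =>
        let hits : Int := R.foldl
          (fun h r => if label ∈ PySem.List.pyGetD frame_label_sets r [] then h + 1 else h) 0
        if hits ≠ 0 then (st.1 ++ [label], st.2 + hits) else st)
      (u, s)
    = (u ++ L.filter (fun label =>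
          decide ((R.filter (fun r => decide (label ∈ PySem.List.pyGetD frame_label_sets r []))).length ≠ 0)),
       s + (L.map (fun label =>
          ((R.filter (fun r => decide (label ∈ PySem.List.pyGetD frame_label_sets r []))).length : Int))).sum) := by
  induction L generalizing u s with
  | nil => simp
  | cons label L ih =>
    simp only [pv_cnt_eq, zero_add] at ih ⊢
    rw [List.foldl_cons]
    by_cases h : (R.filter (fun r => decide (label ∈ PySem.List.pyGetD frame_label_sets r []))).length = 0
    · rw [if_neg (by simpa using h), ih]
      rw [List.filter_cons, if_neg (by simpa using h), List.map_cons, List.sum_cons, h]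
      simp
    · rw [if_pos (by simpa using h), ih]
      rw [List.filter_cons, if_pos (by simpa using h), List.map_cons, List.sum_cons]
      simp [List.append_assoc]
      ring

-- The sorted query list is strictly increasing when query_set has no duplicates.
theorem pv_qs_pairwise_lt (query_set : List String) (h : query_set.Nodup) :
    (PySem.List.sorted query_set (fun x => x) false).Pairwise (· < ·) := by
  have hle : (PySem.List.sorted query_set (fun x => x) false).Pairwise (fun a b => a ≤ b) :=
    PySem.List.sorted_pairwise query_set (fun x => x)
  have hnd : (PySem.List.sorted query_set (fun x => x) false).Nodup :=
    (PySem.List.sorted_perm query_set (fun x => x) false).nodup_iff.mpr h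
  exact (hle.and hnd).imp (fun h => lt_of_le_of_ne h.1 h.2)

-- ===== VERDICT =====
theorem segment_labels_and_support_spec : Claim_equal_segment_labels_and_support := by
  intro rows query frames _ hpre
  obtain ⟨_, hqnd, _⟩ := hpre
  unfold Spec_segment_labels_and_support segment_labels_and_support segment_labels_and_support_alt
  simp only [pvB_loop, List.nil_append, zero_add]
  set p : String → Bool := fun label =>
    decide ((rows.filter (fun r => decide (label ∈ PySem.List.pyGetD frames r []))).length ≠ 0) with hp
  set qs := PySem.List.sorted query (fun x => x) with hqs
  set LA := (rows.foldl
      (fun (st : PySem.Set String × Int) r =>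
        let ov := PySem.Set.inter query (PySem.List.pyGetD frames r [])
        if ov ≠ [] then (PySem.Set.union st.1 ov, st.2 + PySem.Set.len ov) else st)
      (PySem.Set.empty, 0)) with hLA
  -- membership agreement between A's label set and B's filtered sorted list
  have hmem : ∀ x, x ∈ LA.1 ↔ x ∈ qs.filter p := by
    intro x
    rw [hLA, pvA_fst_mem, List.mem_filter, hqs, PySem.List.mem_sorted, hp]
    simp only [PySem.Set.empty, List.not_mem_nil, false_or, decide_eq_true_eq, ne_eq]
    constructor
    · rintro ⟨r, hr, hq, hf⟩
      refine ⟨hq, ?_⟩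
      have : r ∈ rows.filter (fun r => decide (x ∈ PySem.List.pyGetD frames r [])) :=
        List.mem_filter.mpr ⟨hr, by simpa using hf⟩
      intro hlen
      rw [List.length_eq_zero_iff] at hlen
      simp [hlen] at this
    · rintro ⟨hq, hlen⟩
      have hne : rows.filter (fun r => decide (x ∈ PySem.List.pyGetD frames r [])) ≠ [] := by
        intro hnil; exact hlen (by simp [hnil])
      obtain ⟨r, hr⟩ := List.exists_mem_of_ne_nil _ hne
      have := List.mem_filter.mp hr
      exact ⟨r, this.1, hq, by simpa using this.2⟩
  have hempty : (LA.1 = []) ↔ (qs.filter p = []) := by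
    simp only [List.eq_nil_iff_forall_not_mem]
    constructor <;> intro h x hx
    · exact h x ((hmem x).mpr hx)
    · exact h x ((hmem x).mp hx)
  by_cases hLe : LA.1 = []
  · rw [if_pos hLe, if_pos (hempty.mp hLe)]
    by_cases hq : query ≠ []
    · rw [if_pos hq]
      rcases hs : qs with _ | ⟨h, t⟩
      · rw [hqs] at hs
        exact absurd ((PySem.List.sorted_eq_nil_iff _ _ _).mp hs) hq
      · simp [PySem.List.pyGetD_zero_cons]
    · rw [if_neg hq]
      simp only [ne_eq, not_not] at hq
      have : qs = [] := by
        rw [hqs, hq]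
        exact (PySem.List.sorted_eq_nil_iff _ _ _).mpr rfl
      rw [this]
  · rw [if_neg hLe, if_neg (fun hc => hLe (hempty.mpr hc))]
    -- labels: sorted(LA.1) equals the filtered sorted list
    have hqspw : qs.Pairwise (· < ·) := by
      rw [hqs]; exact pv_qs_pairwise_lt query hqnd
    have hqsnd : qs.Nodup := by
      rw [hqs]; exact (PySem.List.sorted_perm query (fun x => x) false).nodup_iff.mpr hqnd
    have hpw : (qs.filter p).Pairwise (· < ·) :=
      List.Pairwise.sublist List.filter_sublist hqspw
    have hnodA : LA.1.Nodup := by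
      rw [hLA]; exact pvA_fst_nodup query frames rows _ (by simp [PySem.Set.empty])
    have hnodB : (qs.filter p).Nodup := List.Nodup.filter _ hqsnd
    have hperm : (qs.filter p).Perm LA.1 :=
      (List.perm_ext_iff_of_nodup hnodB hnodA).mpr (fun x => (hmem x).symm)
    have hsorted : PySem.List.sorted LA.1 (fun x => x) = qs.filter p :=
      PySem.List.sorted_eq_of_perm_of_pairwise_lt _ _ _ hperm hpw
    rw [hsorted]
    -- support: exchange the double count
    have hsum : LA.2 = (qs.map (fun label =>
        ((rows.filter (fun r => decide (label ∈ PySem.List.pyGetD frames r []))).length : Int))).sum := by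
      rw [hLA, pvA_snd]
      simp only [zero_add]
      have hlen : ∀ r : Int, PySem.Set.len (PySem.Set.inter query (PySem.List.pyGetD frames r []))
          = ((query.filter (fun l => decide (l ∈ PySem.List.pyGetD frames r []))).length : Int) := by
        intro r
        simp [PySem.Set.len, PySem.Set.inter]
      calc (rows.map (fun r => PySem.Set.len (PySem.Set.inter query (PySem.List.pyGetD frames r [])))).sum
          = (rows.map (fun r => ((query.filter (fun l => decide (l ∈ PySem.List.pyGetD frames r []))).length : Int))).sum := by
            exact congrArg List.sum (List.map_congr_left (fun r _ => hlen r))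
        _ = (query.map (fun l =>
              ((rows.filter (fun r => decide (l ∈ PySem.List.pyGetD frames r []))).length : Int))).sum :=
            pv_sum_swap rows query (fun r l => decide (l ∈ PySem.List.pyGetD frames r []))
        _ = (qs.map (fun l =>
              ((rows.filter (fun r => decide (l ∈ PySem.List.pyGetD frames r []))).length : Int))).sum := by
            rw [hqs]
            exact List.Perm.sum_eq (List.Perm.map _ (PySem.List.sorted_perm query (fun x => x) false).symm)
    rw [hsum]
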